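/- GENERATED by c/gen_decode.py: decode facts of the image, one per distinct instruction byte string. -/
import UserX.DecodeImage

#decode_all Gif.Dec
  "01c0"  -- add eax,eax
  "0f8423010000"  -- je 10b000
  "0f847affffff"  -- je 1098a6
  "0f84abfeffff"  -- je 10a6f9
  "0f84e2010000"  -- je 10a8ed
  "0f85c2000000"  -- jne 10889c
  "0f8ef7000000"  -- jle 1062e6
  "0f94c0"  -- sete al
  "0fb603"  -- movzx eax,BYTE PTR [rbx]
  "0fb6442430"  -- movzx eax,BYTE PTR [rsp+0x30]
  "0fb67500"  -- movzx esi,BYTE PTR [rbp+0x0]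
  "39f0"  -- cmp eax,esi
  "400fb6c5"  -- movzx eax,bpl
  "410fb6742410"  -- movzx esi,BYTE PTR [r12+0x10]
  "41813c2402100000"  -- cmp DWORD PTR [r12],0x1002
  "4183e408"  -- and r12d,0x8
  "41882c24"  -- mov BYTE PTR [r12],bpl
  "41895c2428"  -- mov DWORD PTR [r12+0x28],ebx
  "4189d4"  -- mov r12d,edx
  "418b4500"  -- mov eax,DWORD PTR [r13+0x0]
  "418b5c2408"  -- mov ebx,DWORD PTR [r12+0x8]
  "41b801000000"  -- mov r8d,0x1
  "41c1ec04"  -- shr r12d,0x4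
  "41c744242c00000000"  -- mov DWORD PTR [r12+0x2c],0x0
  "41c745006d000000"  -- mov DWORD PTR [r13+0x0],0x6d
  "41c784240400c000f1f104f2"  -- mov DWORD PTR [r12+0xc00004],0xf204f1f1
  "41c7860800c00000000000"  -- mov DWORD PTR [r14+0xc00008],0x0
  "440fb6742422"  -- movzx r14d,BYTE PTR [rsp+0x22]
  "44396c240c"  -- cmp DWORD PTR [rsp+0xc],r13d
  "44896304"  -- mov DWORD PTR [rbx+0x4],r12d
  "44897320"  -- mov DWORD PTR [rbx+0x20],r14d
  "4489ea"  -- mov edx,r13d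
  "4489fb"  -- mov ebx,r15d
  "448b6d30"  -- mov r13d,DWORD PTR [rbp+0x30]
  "448b7c2410"  -- mov r15d,DWORD PTR [rsp+0x10]
  "45396c240c"  -- cmp DWORD PTR [r12+0xc],r13d
  "4585ed"  -- test r13d,r13d
  "45887e01"  -- mov BYTE PTR [r14+0x1],r15b
  "4589ec"  -- mov r12d,r13d
  "4801c5"  -- add rbp,rax
  "4829f0"  -- sub rax,rsi
  "48635520"  -- movsxd rdx,DWORD PTR [rbp+0x20]
  "4863f6"  -- movsxd rsi,esi
  "4883c318"  -- add rbx,0x18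
  "4883c601"  -- add rsi,0x1
  "4885ed"  -- test rbp,rbp
  "48896b70"  -- mov QWORD PTR [rbx+0x70],rbp
  "4889d7"  -- mov rdi,rdx
  "488b3c24"  -- mov rdi,QWORD PTR [rsp]
  "488b5d00"  -- mov rbx,QWORD PTR [rbp+0x0]
  "488b6d68"  -- mov rbp,QWORD PTR [rbp+0x68]
  "488b7b20"  -- mov rdi,QWORD PTR [rbx+0x20]
  "488d04d500000000"  -- lea rax,[rdx*8+0x0]
  "488d442460"  -- lea rax,[rsp+0x60]
  "488d70d0"  -- lea rsi,[rax-0x30]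
  "488d742420"  -- lea rsi,[rsp+0x20]
  "488d7b04"  -- lea rdi,[rbx+0x4]
  "488d7b24"  -- lea rdi,[rbx+0x24]
  "488d7b50"  -- lea rdi,[rbx+0x50]
  "488d7d18"  -- lea rdi,[rbp+0x18]
  "488d7d60"  -- lea rdi,[rbp+0x60]
  "488dbd60610000"  -- lea rdi,[rbp+0x6160]
  "48c70424b38ab541"  -- mov QWORD PTR [rsp],0x41b58ab3
  "48c744240820181400"  -- mov QWORD PTR [rsp+0x8],0x141820
  "48c7442408c0141400"  -- mov QWORD PTR [rsp+0x8],0x1414c0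
  "48c7442410808b1000"  -- mov QWORD PTR [rsp+0x10],0x108b80
  "48c7442418a0161400"  -- mov QWORD PTR [rsp+0x18],0x1416a0
  "48c7450000000000"  -- mov QWORD PTR [rbp+0x0],0x0
  "48d3e8"  -- shr rax,cl
  "49630424"  -- movsxd rax,DWORD PTR [r12]
  "4963ec"  -- movsxd rbp,r12d
  "49894500"  -- mov QWORD PTR [r13+0x0],rax
  "4989e4"  -- mov r12,rsp
  "498b5c2458"  -- mov rbx,QWORD PTR [r12+0x58]
  "498d44c500"  -- lea rax,[r13+rax*8+0x0]
  "498d7c2410"  -- lea rdi,[r12+0x10]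
  "498d7c2438"  -- lea rdi,[r12+0x38]
  "498d7d10"  -- lea rdi,[r13+0x10]
  "498d7e1c"  -- lea rdi,[r14+0x1c]
  "498d8658010000"  -- lea rax,[r14+0x158]
  "49c7850000c00000000000"  -- mov QWORD PTR [r13+0xc00000],0x0
  "4c01fd"  -- add rbp,r15
  "4c896318"  -- mov QWORD PTR [rbx+0x18],r12
  "4c89742440"  -- mov QWORD PTR [rsp+0x40],r14
  "4c89fe"  -- mov rsi,r15
  "4c8b6548"  -- mov r12,QWORD PTR [rbp+0x48]
  "4c8b742438"  -- mov r14,QWORD PTR [rsp+0x38]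
  "4c8d2428"  -- lea r12,[rax+rbp*1]
  "4c8d6c8500"  -- lea r13,[rbp+rax*4+0x0]
  "4d85ff"  -- test r15,r15
  "4d8d6485f8"  -- lea r12,[r13+rax*4-0x8]
  "7344"  -- jae 10a2bd
  "7417"  -- je 108c3e
  "7439"  -- je 10a81f
  "7454"  -- je 107c63
  "7481"  -- je 106f75
  "74e5"  -- je 10949a
  "751b"  -- jne 10a305
  "755f"  -- jne 109da3
  "7836"  -- js 10507d
  "7e36"  -- jle 10a538
  "7f17"  -- jg 1051a5
  "807c243000"  -- cmp BYTE PTR [rsp+0x30],0x0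
  "83c101"  -- add ecx,0x1
  "83e801"  -- sub eax,0x1
  "85c9"  -- test ecx,ecx
  "894320"  -- mov DWORD PTR [rbx+0x20],eax
  "895500"  -- mov DWORD PTR [rbp+0x0],edx
  "89c5"  -- mov ebp,eax
  "89dd"  -- mov ebp,ebx
  "8b33"  -- mov esi,DWORD PTR [rbx]
  "8b442428"  -- mov eax,DWORD PTR [rsp+0x28]
  "8b5d50"  -- mov ebx,DWORD PTR [rbp+0x50]
  "8b742414"  -- mov esi,DWORD PTR [rsp+0x14]
  "8d7001"  -- lea esi,[rax+0x1]
  "ba20000000"  -- mov edx,0x20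
  "be03000000"  -- mov esi,0x3
  "bf78000000"  -- mov edi,0x78
  "c70300000000"  -- mov DWORD PTR [rbx],0x0
  "c7431400000000"  -- mov DWORD PTR [rbx+0x14],0x0
  "c743606f000000"  -- mov DWORD PTR [rbx+0x60],0x6f
  "c745006f000000"  -- mov DWORD PTR [rbp+0x0],0x6f
  "c745606f000000"  -- mov DWORD PTR [rbp+0x60],0x6f
  "c7850000c000f1f1f1f1"  -- mov DWORD PTR [rbp+0xc00000],0xf1f1f1f1
  "e80189ffff"  -- call 100720
  "e80599ffff"  -- call 100640
  "e80ae4ffff"  -- call 105160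
  "e80de2ffff"  -- call 105160
  "e811a6ffff"  -- call 1008e0
  "e815fcffff"  -- call 1052e0
  "e81a6bffff"  -- call 100800
  "e820fbffff"  -- call 105480
  "e824fdffff"  -- call 105240
  "e82873ffff"  -- call 1003c0
  "e82bbaffff"  -- call 103800
  "e82ffcffff"  -- call 1052e0
  "e831a4ffff"  -- call 100720
  "e8336cffff"  -- call 1008e0
  "e8368bffff"  -- call 100720
  "e83caeffff"  -- call 100800
  "e841f7ffff"  -- call 107a80
  "e844b0ffff"  -- call 100fc0
  "e84681ffff"  -- call 1008e0
  "e848ffffff"  -- call 107860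
  "e84dafffff"  -- call 100800
  "e8528cffff"  -- call 100800
  "e85793ffff"  -- call 1003c0
  "e85d63ffff"  -- call 100800
  "e8619affff"  -- call 100720
  "e86767ffff"  -- call 100720
  "e86a6bffff"  -- call 100800
  "e86dacffff"  -- call 100640
  "e871efffff"  -- call 109820
  "e8777effff"  -- call 100720
  "e87bb8ffff"  -- call 103800
  "e88270ffff"  -- call 100640
  "e88988ffff"  -- call 100800
  "e88af8ffff"  -- call 107a80
  "e88ea8ffff"  -- call 100800
  "e89769ffff"  -- call 100720
  "e899a4ffff"  -- call 100720
  "e8a179ffff"  -- call 1008e0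
  "e8a67effff"  -- call 100720
  "e8ac9affff"  -- call 103800
  "e8ada4ffff"  -- call 100720
  "e8b099ffff"  -- call 100640
  "e8b4ddffff"  -- call 107a80
  "e8b7aaffff"  -- call 100300
  "e8bb5cffff"  -- call 100640
  "e8befcffff"  -- call 105660
  "e8c4a9ffff"  -- call 100300
  "e8c78affff"  -- call 100640
  "e8ca9fffff"  -- call 100800
  "e8d077ffff"  -- call 1008e0
  "e8d59bffff"  -- call 100480
  "e8d98dffff"  -- call 101520
  "e8df7effff"  -- call 100720
  "e8e26bffff"  -- call 1008e0
  "e8e696ffff"  -- call 100300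
  "e8eb6dffff"  -- call 100720
  "e8f060ffff"  -- call 1008e0
  "e8f562ffff"  -- call 100800
  "e8fa57ffff"  -- call 100720
  "e906010000"  -- jmp 1059af
  "e937ffffff"  -- jmp 10659d
  "e952ffffff"  -- jmp 108bf5
  "e978ffffff"  -- jmp 106c7e
  "e999000000"  -- jmp 107fa0
  "e9c9feffff"  -- jmp 10949a
  "eb1e"  -- jmp 105082
  "eb64"  -- jmp 107e27
  "eba9"  -- jmp 106807
  "ebbb"  -- jmp 10a8ed
  "ebd5"  -- jmp 105cb8
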